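-- pv_equiv track=rewrite | github.com/yonysek/B3B33ALP | Homeworks/10/nurikabenvm2.py | isolatedRiver
-- ===== SOURCE A (Python) =====
-- directions = ((1, 0), (0, 1), (-1, 0), (0, -1))
--
-- def inBoard(board, i, j):
--     if i < 0 or j < 0 or i > len(board) - 1 or j > len(board) - 1:
--         return False
--     else:
--         return True
--
-- def findRivers(board):
--     rivers = []
--     for i in range(len(board)):
--         for j in range(len(board)):
--             current = []
--             stack = []
--             if board[i][j] == 0:
--                 stack.append([i, j])
--                 while len(stack) > 0:
--                     current.append(stack.pop())
--                     for k in directions: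
--                         iC = current[-1][0] + k[0]
--                         jC = current[-1][1] + k[1]
--                         if not inBoard(board, iC, jC):
--                             continue
--                         if board[iC][jC] == 0 and [iC, jC] not in current:
--                             stack.append([iC, jC])
--                 if len(rivers) == 0:
--                     rivers.append(current)
--                 unique = True
--                 for river in rivers:
--                     if len(current) == len(river):
--                         for tile in current:
--                             if tile in river:
--                                 unique = False
--                                 continue
--
--                 if unique:
--                     rivers.append(current)
--
--     return rivers
--
-- def isolatedRiver(board):
--     rivers = findRivers(board)
--     if len(rivers) == 1:
--         return
--     validRivers = 0
--     for river in rivers: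
--         expansions = 0
--         for tile in river:
--             for direction in directions:
--                 iC = tile[0] + direction[0]
--                 jC = tile[1] + direction[1]
--                 if not inBoard(board, iC, jC):
--                     continue
--                 if board[iC][jC] == 0:
--                     continue
--                 if board[iC][jC] == -1:
--                     expansions += 1
--         if expansions > 0:
--             validRivers += 1
--
--     if validRivers == len(rivers):
--         return False
--
--     return True
-- ===== SOURCE B (Python) =====
-- def isolatedRiver(board):
--     n = len(board)
--     visited = set()
--     rivers = 0
--     walled = 0
--     for i in range(n):
--         for j in range(n):
--             if board[i][j] == 0 and (i, j) not in visited: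
--                 rivers += 1
--                 comp = []
--                 stack = [(i, j)]
--                 visited.add((i, j))
--                 while stack:
--                     x, y = stack.pop()
--                     comp.append((x, y))
--                     for dx, dy in ((1, 0), (0, 1), (-1, 0), (0, -1)):
--                         p = (x + dx, y + dy)
--                         if 0 <= p[0] < n and 0 <= p[1] < n and board[p[0]][p[1]] == 0 and p not in visited:
--                             visited.add(p)
--                             stack.append(p)
--                 if any(0 <= x + dx < n and 0 <= y + dy < n and board[x + dx][y + dy] == -1
--                        for (x, y) in comp for dx, dy in ((1, 0), (0, 1), (-1, 0), (0, -1))):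
--                     walled += 1
--     if rivers == 1:
--         return None
--     return False if walled == rivers else True
-- ===== Notes on version B (the rewrite author's own statement) =====
-- stated objective: alternative
-- what changed: B floods each river once in a single scan using a global visited set (each cell pushed at most once) and checks wall-adjacency on the spot, instead of A's re-flooding from every zero cell with a duplicate-tolerant stack, membership scans over the growing flood list, and a pairwise length/intersection dedup over all collected floods; intended as faster (measured 1.37x on a timing run's random family, below the 1.5x bar).
import Mathlib
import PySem

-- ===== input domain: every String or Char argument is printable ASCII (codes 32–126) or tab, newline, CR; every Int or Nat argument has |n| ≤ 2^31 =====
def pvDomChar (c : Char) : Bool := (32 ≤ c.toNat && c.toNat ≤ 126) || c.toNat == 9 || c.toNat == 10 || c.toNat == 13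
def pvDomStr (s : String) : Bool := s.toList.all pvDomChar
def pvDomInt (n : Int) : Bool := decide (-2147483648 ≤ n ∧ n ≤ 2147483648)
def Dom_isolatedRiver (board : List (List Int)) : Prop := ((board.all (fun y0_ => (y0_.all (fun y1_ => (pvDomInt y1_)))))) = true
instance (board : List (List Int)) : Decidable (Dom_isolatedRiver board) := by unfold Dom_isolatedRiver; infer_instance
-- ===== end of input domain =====

-- B replaces A's per-cell re-flooding (a DFS whose stack may hold duplicates, re-run from every
-- zero cell, plus a pairwise dedup over the collected floods) by a single scan with a global
-- visited set: each river is flooded once and checked for a bordering wall on the spot.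


-- ===== PORT A =====

-- board[i][j]: both programs only index after establishing 0 ≤ i,j < len(board), and Pre_
-- guarantees every row has at least len(board) entries, so pyGet? is exact there
-- (the default 1 is never reached on admitted inputs).
def pvAt (board : List (List Int)) (i j : Int) : Int :=
  (((PySem.List.pyGet? board i).bind (fun row => PySem.List.pyGet? row j)).getD 1)

-- the module constant `directions`
def pvDirs : List (Int × Int) := [(1, 0), (0, 1), (-1, 0), (0, -1)]

def inBoard (board : List (List Int)) (i j : Int) : Bool :=
  if i < 0 || j < 0 || i > (board.length : Int) - 1 || j > (board.length : Int) - 1 then false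
  else true

-- A's `while len(stack) > 0` loop.  The stack top is the HEAD of the list here (Python pushes and
-- pops at the end), so the pushes of one round are appended in reverse in front of the rest.
-- The loop always terminates within 4*n*n+1 iterations (proved below, `floodA_main`), so the
-- fuel 4*n*n+2 is never exhausted.
def floodLoop (board : List (List Int)) : Nat → List (Int × Int) → List (Int × Int) → List (Int × Int)
  | 0, current, _ => current
  | fuel + 1, current, stack =>
    match stack with
    | [] => current
    | u :: rest =>
      let current' := current ++ [u]
      let pushes := (pvDirs.filter (fun d =>
          inBoard board (u.1 + d.1) (u.2 + d.2) &&
          pvAt board (u.1 + d.1) (u.2 + d.2) == 0 &&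
          !(current'.contains (u.1 + d.1, u.2 + d.2)))).map (fun d => (u.1 + d.1, u.2 + d.2))
      floodLoop board fuel current' (pushes.reverse ++ rest)

def findRivers (board : List (List Int)) : List (List (Int × Int)) :=
  (PySem.List.pyRange 0 (board.length : Int) 1).foldl (fun rivers i =>
    (PySem.List.pyRange 0 (board.length : Int) 1).foldl (fun rivers j =>
      if pvAt board i j == 0 then
        let current := floodLoop board (4 * board.length * board.length + 2) [] [(i, j)]
        let rivers1 := if rivers.length = 0 then rivers ++ [current] else rivers
        let unique := rivers1.foldl (fun u river =>
          if current.length = river.length then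
            current.foldl (fun u2 tile => if river.contains tile then false else u2) u
          else u) true
        if unique then rivers1 ++ [current] else rivers1
      else rivers) rivers) []

def isolatedRiver (board : List (List Int)) : Option Bool :=
  let rivers := findRivers board
  if rivers.length = 1 then none
  else
    let validRivers : Int := rivers.foldl (fun (v : Int) river =>
      let expansions : Int := river.foldl (fun e tile =>
        pvDirs.foldl (fun e d =>
          if !(inBoard board (tile.1 + d.1) (tile.2 + d.2)) then e
          else if pvAt board (tile.1 + d.1) (tile.2 + d.2) == 0 then e
          else if pvAt board (tile.1 + d.1) (tile.2 + d.2) == -1 then e + 1 else e) e) (0 : Int)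
      if expansions > 0 then v + 1 else v) (0 : Int)
    if validRivers = (rivers.length : Int) then some false else some true

-- ===== PORT B =====

-- B's inner `while stack` loop: pop a cell into the component, push each unvisited in-range
-- zero neighbour and mark it visited at push time (so every cell is pushed at most once).
-- Stack top at the head; fuel n*n+2 is never exhausted (proved below, `floodB_main`).
def floodAlt (board : List (List Int)) :
    Nat → List (Int × Int) → List (Int × Int) → PySem.Set (Int × Int) →
    List (Int × Int) × PySem.Set (Int × Int)
  | 0, comp, _, visited => (comp, visited)
  | fuel + 1, comp, stack, visited =>
    match stack with
    | [] => (comp, visited)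
    | u :: rest =>
      let comp' := comp ++ [u]
      let sv := pvDirs.foldl (fun (sv : List (Int × Int) × PySem.Set (Int × Int)) d =>
          let p := (u.1 + d.1, u.2 + d.2)
          if 0 ≤ p.1 && p.1 < (board.length : Int) && 0 ≤ p.2 && p.2 < (board.length : Int) &&
             pvAt board p.1 p.2 == 0 && !(sv.2.contains p)
          then (p :: sv.1, sv.2.add p) else sv) (rest, visited)
      floodAlt board fuel comp' sv.1 sv.2

def isolatedRiver_alt (board : List (List Int)) : Option Bool :=
  let n := board.length
  let st := (PySem.List.pyRange 0 (n : Int) 1).foldl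
      (fun (st : PySem.Set (Int × Int) × Int × Int) i =>
    (PySem.List.pyRange 0 (n : Int) 1).foldl
      (fun (st : PySem.Set (Int × Int) × Int × Int) j =>
      if pvAt board i j == 0 && !(st.1.contains (i, j)) then
        let r := floodAlt board (n * n + 2) [] [(i, j)] (st.1.add (i, j))
        let walledHere := r.1.any (fun t => pvDirs.any (fun d =>
            0 ≤ t.1 + d.1 && t.1 + d.1 < (n : Int) && 0 ≤ t.2 + d.2 && t.2 + d.2 < (n : Int) &&
            pvAt board (t.1 + d.1) (t.2 + d.2) == -1))
        (r.2, st.2.1 + 1, st.2.2 + (if walledHere then 1 else 0))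
      else st) st) ((PySem.Set.empty : PySem.Set (Int × Int)), (0 : Int), (0 : Int))
  if st.2.1 = 1 then none
  else if st.2.2 = st.2.1 then some false else some true

-- ===== PRECONDITION & SPEC =====

-- A indexes board[i][j] for all i, j < len(board); it raises IndexError exactly when some row is
-- shorter than the number of rows.  Pre_ excludes exactly those inputs.
def Pre_isolatedRiver (board : List (List Int)) : Prop :=
  ∀ row ∈ board, board.length ≤ row.length

instance (board : List (List Int)) : Decidable (Pre_isolatedRiver board) := by
  unfold Pre_isolatedRiver; infer_instance

def pvWitness_isolatedRiver : List (List Int) := [[0, -1], [1, 0]]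

def Spec_isolatedRiver (board : List (List Int)) (out : Option Bool) : Prop :=
  out = isolatedRiver_alt board

instance (board : List (List Int)) (out : Option Bool) : Decidable (Spec_isolatedRiver board out) := by
  unfold Spec_isolatedRiver; infer_instance

-- ===== CLAIM (what is proved, stated in full; the proofs are below) =====
def Claim_equal_isolatedRiver : Prop :=
  ∀ (board : List (List Int)), Dom_isolatedRiver board → Pre_isolatedRiver board →
    Spec_isolatedRiver board (isolatedRiver board)

-- ===== LEMMAS AND PROOFS =====

-- ---------- basic geometry ----------

-- `zrb board u`: u is an in-range zero cell ("river tile")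
def zrb (board : List (List Int)) (u : Int × Int) : Bool :=
  decide (0 ≤ u.1 ∧ u.1 < (board.length : Int) ∧ 0 ≤ u.2 ∧ u.2 < (board.length : Int)) &&
  (pvAt board u.1 u.2 == 0)

def nbrs (u : Int × Int) : List (Int × Int) := pvDirs.map (fun d => (u.1 + d.1, u.2 + d.2))

def adjb (board : List (List Int)) (u v : Int × Int) : Bool :=
  zrb board u && zrb board v && decide (v ∈ nbrs u)

def Reach (board : List (List Int)) (s v : Int × Int) : Prop :=
  Relation.ReflTransGen (fun a b => adjb board a b = true) s v

noncomputable def gridF (board : List (List Int)) : Finset (Int × Int) :=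
  Finset.Icc (0 : Int) ((board.length : Int) - 1) ×ˢ Finset.Icc (0 : Int) ((board.length : Int) - 1)

noncomputable def compF (board : List (List Int)) (s : Int × Int) : Finset (Int × Int) :=
  @Finset.filter _ (fun v => Reach board s v) (Classical.decPred _) (gridF board)

def degIn (board : List (List Int)) (P : Finset (Int × Int)) (u : Int × Int) : Nat :=
  (P.filter (fun v => adjb board u v = true)).card

def deg (board : List (List Int)) (u : Int × Int) : Nat :=
  ((nbrs u).filter (fun v => zrb board v)).length

def eo (board : List (List Int)) (P : Finset (Int × Int)) : Nat := ∑ a ∈ P, degIn board P a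

def degSum (board : List (List Int)) (P : Finset (Int × Int)) : Nat := ∑ a ∈ P, deg board a

-- a wall (-1) directly next to u, inside the n×n square
def wallB (board : List (List Int)) (u : Int × Int) : Bool :=
  decide (0 ≤ u.1 ∧ u.1 < (board.length : Int) ∧ 0 ≤ u.2 ∧ u.2 < (board.length : Int)) &&
  (pvAt board u.1 u.2 == -1)

lemma nbrs_nodup (u : Int × Int) : (nbrs u).Nodup := by
  simp [nbrs, pvDirs, Prod.ext_iff]

lemma mem_nbrs_comm {u v : Int × Int} : v ∈ nbrs u ↔ u ∈ nbrs v := by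
  simp [nbrs, pvDirs, Prod.ext_iff]; omega

lemma self_not_mem_nbrs (u : Int × Int) : u ∉ nbrs u := by
  simp [nbrs, pvDirs, Prod.ext_iff]

lemma adjb_comm (board : List (List Int)) (u v : Int × Int) :
    adjb board u v = adjb board v u := by
  simp only [adjb]
  rw [Bool.eq_iff_iff]
  simp [mem_nbrs_comm (u := u) (v := v)]
  tauto

lemma adjb_self_false (board : List (List Int)) (u : Int × Int) : adjb board u u = false := by
  simp [adjb, self_not_mem_nbrs]

lemma adjb_zr_right {board : List (List Int)} {u v : Int × Int} (h : adjb board u v = true) :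
    zrb board v = true := by
  simp [adjb] at h; exact h.1.2

lemma reach_zr {board : List (List Int)} {s v : Int × Int} (h : Reach board s v)
    (hs : zrb board s = true) : zrb board v = true := by
  induction h with
  | refl => exact hs
  | tail _ hab ih => exact adjb_zr_right hab

lemma reach_symm {board : List (List Int)} {s v : Int × Int} (h : Reach board s v) :
    Reach board v s :=
  (Relation.ReflTransGen.symmetric (fun a b hab => by rw [adjb_comm] at hab; exact hab)) h

lemma zr_mem_grid {board : List (List Int)} {v : Int × Int} (h : zrb board v = true) :
    v ∈ gridF board := by
  simp [zrb] at h
  simp [gridF, Finset.mem_Icc]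
  omega

lemma mem_compF {board : List (List Int)} {s v : Int × Int} (hs : zrb board s = true) :
    v ∈ compF board s ↔ Reach board s v := by
  unfold compF
  rw [@Finset.mem_filter _ _ (Classical.decPred _)]
  constructor
  · exact fun h => h.2
  · exact fun h => ⟨zr_mem_grid (reach_zr h hs), h⟩

lemma self_mem_compF {board : List (List Int)} {s : Int × Int} (hs : zrb board s = true) :
    s ∈ compF board s := (mem_compF hs).2 Relation.ReflTransGen.refl

lemma compF_eq_of_reach {board : List (List Int)} {s t : Int × Int} (hs : zrb board s = true)
    (h : Reach board s t) : compF board s = compF board t := by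
  have ht : zrb board t = true := reach_zr h hs
  apply Finset.ext
  intro v
  rw [mem_compF hs, mem_compF ht]
  exact ⟨fun hv => ((reach_symm h).trans hv), fun hv => h.trans hv⟩

lemma compF_eq_or_disjoint {board : List (List Int)} {s t : Int × Int}
    (hs : zrb board s = true) (ht : zrb board t = true) :
    compF board s = compF board t ∨ ∀ x, x ∈ compF board s → x ∉ compF board t := by
  by_cases h : Reach board s t
  · exact Or.inl (compF_eq_of_reach hs h)
  · right
    intro x hxs hxt
    rw [mem_compF hs] at hxs
    rw [mem_compF ht] at hxt
    exact h (hxs.trans (reach_symm hxt))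

lemma card_gridF (board : List (List Int)) :
    (gridF board).card = board.length * board.length := by
  simp [gridF, Int.card_Icc]

lemma deg_le_four (board : List (List Int)) (u : Int × Int) : deg board u ≤ 4 := by
  have := List.length_filter_le (fun v => zrb board v) (nbrs u)
  simpa [deg, nbrs, pvDirs] using this

lemma card_le_N {board : List (List Int)} {P : Finset (Int × Int)}
    (h : ∀ v ∈ P, zrb board v = true) : P.card ≤ board.length * board.length := by
  calc P.card ≤ (gridF board).card := Finset.card_le_card (fun v hv => zr_mem_grid (h v hv))
    _ = board.length * board.length := card_gridF board

lemma degSum_le {board : List (List Int)} (P : Finset (Int × Int)) :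
    degSum board P ≤ 4 * P.card := by
  calc degSum board P ≤ ∑ _a ∈ P, 4 := Finset.sum_le_sum (fun a _ => deg_le_four board a)
    _ = 4 * P.card := by simp [Nat.mul_comm]

-- ---------- counting deltas ----------

lemma degIn_insert_self {board : List (List Int)} {P : Finset (Int × Int)} {u : Int × Int} :
    degIn board (insert u P) u = degIn board P u := by
  unfold degIn
  rw [Finset.filter_insert]
  simp [adjb_self_false]

lemma degIn_insert_other {board : List (List Int)} {P : Finset (Int × Int)} {u a : Int × Int}
    (hu : u ∉ P) :
    degIn board (insert u P) a = degIn board P a + (if adjb board a u = true then 1 else 0) := by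
  unfold degIn
  rw [Finset.filter_insert]
  split_ifs with h
  · rw [Finset.card_insert_of_notMem (by simp [hu])]
  · rfl

lemma eo_insert {board : List (List Int)} {P : Finset (Int × Int)} {u : Int × Int} (hu : u ∉ P) :
    eo board (insert u P) = eo board P + 2 * degIn board P u := by
  unfold eo
  rw [Finset.sum_insert hu, degIn_insert_self]
  have hsum : ∑ a ∈ P, degIn board (insert u P) a
      = ∑ a ∈ P, (degIn board P a + if adjb board a u = true then 1 else 0) :=
    Finset.sum_congr rfl (fun a _ => degIn_insert_other hu)
  rw [hsum, Finset.sum_add_distrib]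
  have hcard : (∑ a ∈ P, if adjb board a u = true then 1 else 0) = degIn board P u := by
    unfold degIn
    rw [Finset.card_filter]
    apply Finset.sum_congr rfl
    intro a _
    rw [adjb_comm]
  omega

lemma degSum_insert {board : List (List Int)} {P : Finset (Int × Int)} {u : Int × Int}
    (hu : u ∉ P) : degSum board (insert u P) = degSum board P + deg board u := by
  unfold degSum
  rw [Finset.sum_insert hu]
  omega

-- count over the four directions vs degIn
lemma countP_split {α : Type} (l : List α) (p q : α → Bool) :
    (l.filter (fun x => p x && q x)).length + (l.filter (fun x => p x && !q x)).length
      = (l.filter p).length := by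
  induction l with
  | nil => rfl
  | cons x t ih =>
    by_cases hp : p x <;> by_cases hq : q x <;> simp [hp, hq] <;> omega

lemma degIn_eq_count {board : List (List Int)} {P : Finset (Int × Int)} {u : Int × Int}
    (hzr : zrb board u = true) :
    degIn board P u = ((nbrs u).filter (fun v => zrb board v && decide (v ∈ P))).length := by
  have hnd : ((nbrs u).filter (fun v => zrb board v && decide (v ∈ P))).Nodup :=
    (nbrs_nodup u).filter _
  rw [← List.toFinset_card_of_nodup hnd]
  unfold degIn
  congr 1
  apply Finset.ext
  intro v
  simp only [Finset.mem_filter, List.mem_toFinset, List.mem_filter, adjb, hzr, Bool.and_eq_true,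
    decide_eq_true_eq, Bool.true_and]
  tauto

-- ---------- the A-side flood fill ----------

lemma inBoard_iff (board : List (List Int)) (i j : Int) :
    inBoard board i j = true ↔
      (0 ≤ i ∧ i < (board.length : Int) ∧ 0 ≤ j ∧ j < (board.length : Int)) := by
  simp [inBoard]
  tauto

lemma zrb_eq_inBoard (board : List (List Int)) (p : Int × Int) :
    zrb board p = (inBoard board p.1 p.2 && (pvAt board p.1 p.2 == 0)) := by
  rw [Bool.eq_iff_iff]
  simp only [zrb, Bool.and_eq_true, decide_eq_true_eq, inBoard_iff]

def pushesA (board : List (List Int)) (cur' : List (Int × Int)) (u : Int × Int) :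
    List (Int × Int) :=
  (pvDirs.filter (fun d =>
      inBoard board (u.1 + d.1) (u.2 + d.2) &&
      pvAt board (u.1 + d.1) (u.2 + d.2) == 0 &&
      !(cur'.contains (u.1 + d.1, u.2 + d.2)))).map (fun d => (u.1 + d.1, u.2 + d.2))

lemma floodLoop_cons (board : List (List Int)) (fuel : Nat) (cur : List (Int × Int))
    (u : Int × Int) (rest : List (Int × Int)) :
    floodLoop board (fuel + 1) cur (u :: rest)
      = floodLoop board fuel (cur ++ [u]) ((pushesA board (cur ++ [u]) u).reverse ++ rest) := rfl

lemma mem_pushesA {board : List (List Int)} {cur' : List (Int × Int)} {u v : Int × Int} :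
    v ∈ pushesA board cur' u ↔ (v ∈ nbrs u ∧ zrb board v = true ∧ v ∉ cur') := by
  simp only [pushesA, List.mem_map, List.mem_filter]
  constructor
  · rintro ⟨d, ⟨hd, hc⟩, rfl⟩
    rw [Bool.and_eq_true, Bool.and_eq_true] at hc
    refine ⟨List.mem_map_of_mem hd, ?_, ?_⟩
    · rw [zrb_eq_inBoard]
      simp [hc.1.1, hc.1.2]
    · have := hc.2
      simp only [Bool.not_eq_eq_eq_not, Bool.not_true, List.contains_eq_mem,
        decide_eq_false_iff_not] at this
      exact this
  · rintro ⟨hv, hz, hnc⟩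
    rw [nbrs, List.mem_map] at hv
    obtain ⟨d, hd, rfl⟩ := hv
    refine ⟨d, ⟨hd, ?_⟩, rfl⟩
    rw [zrb_eq_inBoard] at hz
    rw [Bool.and_eq_true] at hz
    simp [hz.1, hz.2, hnc]

lemma length_pushesA {board : List (List Int)} {cur' : List (Int × Int)} {u : Int × Int}
    (hzr : zrb board u = true) :
    (pushesA board cur' u).length + degIn board cur'.toFinset u = deg board u := by
  have hdeg : deg board u
      = (pvDirs.filter (fun d => zrb board (u.1 + d.1, u.2 + d.2))).length := by
    unfold deg nbrs
    rw [List.filter_map, List.length_map]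
    rfl
  have hdegIn : degIn board cur'.toFinset u
      = (pvDirs.filter (fun d => zrb board (u.1 + d.1, u.2 + d.2)
          && decide ((u.1 + d.1, u.2 + d.2) ∈ cur'))).length := by
    rw [degIn_eq_count hzr]
    unfold nbrs
    rw [List.filter_map, List.length_map]
    congr 1
    apply List.filter_congr
    intro d _
    simp [List.mem_toFinset]
  have hpush : (pushesA board cur' u).length
      = (pvDirs.filter (fun d => zrb board (u.1 + d.1, u.2 + d.2)
          && !decide ((u.1 + d.1, u.2 + d.2) ∈ cur'))).length := by
    unfold pushesA
    rw [List.length_map]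
    congr 1
    apply List.filter_congr
    intro d _
    rw [zrb_eq_inBoard]
    simp [List.contains_eq_mem, Bool.and_assoc]
  rw [hdeg, hdegIn, hpush, Nat.add_comm]
  exact countP_split pvDirs _ _


def SIinv (board : List (List Int)) (cur stack : List (Int × Int)) : Prop :=
  ∀ pre u post, stack = pre ++ u :: post → u ∈ cur →
    ∀ v, adjb board u v = true → v ∉ cur → v ∈ pre

lemma floodLoop_nil (board : List (List Int)) (fuel : Nat) (cur : List (Int × Int)) :
    floodLoop board fuel cur [] = cur := by
  cases fuel <;> rfl

lemma reach_sub {board : List (List Int)} {s : Int × Int} {cur : List (Int × Int)}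
    (hs0 : s ∈ cur) (hCL0 : ∀ u ∈ cur, ∀ v, adjb board u v = true → v ∈ cur) :
    ∀ v, Reach board s v → v ∈ cur := by
  intro v hv
  induction hv with
  | refl => exact hs0
  | tail _ hab ih => exact hCL0 _ ih _ hab

lemma floodA_terminal {board : List (List Int)} {s : Int × Int} {cur : List (Int × Int)}
    (hzr : zrb board s = true)
    (h1 : ∀ v ∈ cur, Reach board s v)
    (hCL0 : ∀ u ∈ cur, ∀ v, adjb board u v = true → v ∈ cur)
    (hs0 : s ∈ cur) : cur.toFinset = compF board s := by
  apply Finset.ext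
  intro v
  rw [List.mem_toFinset, mem_compF hzr]
  exact ⟨fun h => h1 v h, fun h => reach_sub hs0 hCL0 v h⟩

lemma floodA_main (board : List (List Int)) (s : Int × Int) (hzr : zrb board s = true) :
    ∀ (fuel : Nat) (cur stack : List (Int × Int)),
    (∀ v ∈ cur, Reach board s v) →
    (∀ v ∈ stack, Reach board s v) →
    (∀ u ∈ cur, ∀ v, adjb board u v = true → v ∈ cur ∨ v ∈ stack) →
    (s ∈ cur ∨ s ∈ stack) →
    SIinv board cur stack →
    2 * cur.length + 2 * stack.length + eo board cur.toFinset
      = 2 + 2 * degSum board cur.toFinset →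
    4 * (board.length * board.length) + 1 ≤ fuel + cur.length →
    (floodLoop board fuel cur stack).toFinset = compF board s ∧
    2 * (floodLoop board fuel cur stack).length + eo board (compF board s)
      = 2 + 2 * degSum board (compF board s) := by
  intro fuel
  induction fuel with
  | zero =>
    intro cur stack h1 h2 hCL hs hSI hcount hfuel
    have hP : ∀ v ∈ cur.toFinset, zrb board v = true := by
      intro v hv
      exact reach_zr (h1 v (List.mem_toFinset.1 hv)) hzr
    have hcard : cur.toFinset.card ≤ board.length * board.length := card_le_N hP
    have hds : degSum board cur.toFinset ≤ 4 * cur.toFinset.card := degSum_le _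
    have hlen : cur.toFinset.card ≤ cur.length := cur.toFinset_card_le
    have hstack : stack = [] := by
      rw [← List.length_eq_zero_iff]
      omega
    subst hstack
    rw [floodLoop_nil]
    have hset : cur.toFinset = compF board s := by
      apply floodA_terminal hzr h1
      · intro u hu v hadj
        rcases hCL u hu v hadj with h | h
        · exact h
        · exact absurd h (List.not_mem_nil)
      · rcases hs with h | h
        · exact h
        · exact absurd h (List.not_mem_nil)
    refine ⟨hset, ?_⟩
    rw [← hset]
    simp only [List.length_nil] at hcount
    omega
  | succ fuel ih =>
    intro cur stack h1 h2 hCL hs hSI hcount hfuel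
    cases stack with
    | nil =>
      show (floodLoop board (fuel + 1) cur []).toFinset = _ ∧ _
      rw [floodLoop_nil]
      have hset : cur.toFinset = compF board s := by
        apply floodA_terminal hzr h1
        · intro u hu v hadj
          rcases hCL u hu v hadj with h | h
          · exact h
          · exact absurd h (List.not_mem_nil)
        · rcases hs with h | h
          · exact h
          · exact absurd h (List.not_mem_nil)
      refine ⟨hset, ?_⟩
      rw [← hset]
      simp only [List.length_nil] at hcount
      omega
    | cons u rest =>
      rw [floodLoop_cons]
      have hzu : zrb board u = true := reach_zr (h2 u (List.mem_cons_self)) hzr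
      have hureach : Reach board s u := h2 u List.mem_cons_self
      by_cases hu : u ∈ cur
      · -- u already popped: no pushes, everything unchanged
        have hpushnil : pushesA board (cur ++ [u]) u = [] := by
          rw [List.eq_nil_iff_forall_not_mem]
          intro v hvm
          rw [mem_pushesA] at hvm
          obtain ⟨hn, hz, hnc⟩ := hvm
          have hadj : adjb board u v = true := by simp [adjb, hzu, hz, hn]
          have hvc : v ∉ cur := fun hc => hnc (List.mem_append.2 (Or.inl hc))
          have := hSI [] u rest rfl hu v hadj hvc
          exact absurd this (List.not_mem_nil)
        rw [hpushnil]
        simp only [List.reverse_nil, List.nil_append]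
        apply ih
        · intro v hv
          rcases List.mem_append.1 hv with h | h
          · exact h1 v h
          · rw [List.mem_singleton] at h
            exact h ▸ hureach
        · intro v hv
          exact h2 v (List.mem_cons_of_mem u hv)
        · intro w hw v hadj
          have hw' : w ∈ cur := by
            rcases List.mem_append.1 hw with h | h
            · exact h
            · rw [List.mem_singleton] at h
              exact h ▸ hu
          rcases hCL w hw' v hadj with h | h
          · exact Or.inl (List.mem_append.2 (Or.inl h))
          · rcases List.mem_cons.1 h with h' | h'
            · exact Or.inl (List.mem_append.2 (Or.inr (by simp [h'])))
            · exact Or.inr h'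
        · rcases hs with h | h
          · exact Or.inl (List.mem_append.2 (Or.inl h))
          · rcases List.mem_cons.1 h with h' | h'
            · exact Or.inl (List.mem_append.2 (Or.inl (h' ▸ hu)))
            · exact Or.inr h'
        · intro pre w post hsp hw v hadj hv
          have hw' : w ∈ cur := by
            rcases List.mem_append.1 hw with h | h
            · exact h
            · rw [List.mem_singleton] at h
              exact h ▸ hu
          have hvc : v ∉ cur := fun hc => hv (List.mem_append.2 (Or.inl hc))
          have := hSI (u :: pre) w post (by rw [hsp]; rfl) hw' v hadj hvc
          rcases List.mem_cons.1 this with h' | h'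
          · exact absurd (List.mem_append.2 (Or.inr (by simp [h'.symm]))) hv
          · exact h'
        · have hts : (cur ++ [u]).toFinset = cur.toFinset := by
            rw [List.toFinset_append, Finset.union_eq_left]
            intro x hx
            simp only [List.toFinset_cons, List.toFinset_nil, insert_empty_eq,
              Finset.mem_singleton] at hx
            exact List.mem_toFinset.2 (hx ▸ hu)
          rw [hts]
          simp only [List.length_append, List.length_cons, List.length_nil] at hcount ⊢
          omega
        · simp only [List.length_append, List.length_cons, List.length_nil]
          omega
      · -- u is new: it joins the component, its fresh neighbours are pushed
        have huP : u ∉ cur.toFinset := by simpa using hu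
        have hPF : (cur ++ [u]).toFinset = insert u cur.toFinset := by
          rw [List.toFinset_append, Finset.union_comm]
          have h1 : ([u] : List (Int × Int)).toFinset = {u} := by simp
          rw [h1, Finset.singleton_union]
        have hvpush : ∀ v, adjb board u v = true → v ∉ cur ++ [u] →
            v ∈ pushesA board (cur ++ [u]) u := by
          intro v hadj hv
          rw [mem_pushesA]
          simp only [adjb, Bool.and_eq_true, decide_eq_true_eq] at hadj
          exact ⟨hadj.2, hadj.1.2, hv⟩
        apply ih
        · intro v hv
          rcases List.mem_append.1 hv with h | h
          · exact h1 v h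
          · rw [List.mem_singleton] at h
            exact h ▸ hureach
        · intro v hv
          rcases List.mem_append.1 hv with h | h
          · rw [List.mem_reverse, mem_pushesA] at h
            have hadj : adjb board u v = true := by simp [adjb, hzu, h.2.1, h.1]
            exact hureach.tail hadj
          · exact h2 v (List.mem_cons_of_mem u h)
        · intro w hw v hadj
          rcases List.mem_append.1 hw with h | h
          · rcases hCL w h v hadj with h' | h'
            · exact Or.inl (List.mem_append.2 (Or.inl h'))
            · rcases List.mem_cons.1 h' with h'' | h''
              · exact Or.inl (List.mem_append.2 (Or.inr (by simp [h''])))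
              · exact Or.inr (List.mem_append.2 (Or.inr h''))
          · rw [List.mem_singleton] at h
            subst h
            by_cases hvc : v ∈ cur ++ [w]
            · exact Or.inl hvc
            · exact Or.inr (List.mem_append.2 (Or.inl (List.mem_reverse.2 (hvpush v hadj hvc))))
        · rcases hs with h | h
          · exact Or.inl (List.mem_append.2 (Or.inl h))
          · rcases List.mem_cons.1 h with h' | h'
            · exact Or.inl (List.mem_append.2 (Or.inr (by simp [h'])))
            · exact Or.inr (List.mem_append.2 (Or.inr h'))
        · intro pre w post hsp hw v hadj hv
          have hvne : v ≠ u := by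
            intro h
            exact hv (h ▸ List.mem_append.2 (Or.inr (List.mem_singleton.2 rfl)))
          have hvc : v ∉ cur := fun hc => hv (List.mem_append.2 (Or.inl hc))
          rcases List.append_eq_append_iff.1 hsp with ⟨as, hys, hxs⟩ | ⟨bs, hws, hzs⟩
          · -- w sits in the old rest
            rcases List.mem_append.1 hw with hwc | hwu
            · have := hSI (u :: as) w post (by rw [hxs]; rfl) hwc v hadj hvc
              rcases List.mem_cons.1 this with h' | h'
              · exact absurd h' hvne
              · rw [hys]
                exact List.mem_append.2 (Or.inr h')
            · rw [List.mem_singleton] at hwu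
              subst hwu
              rw [hys]
              exact List.mem_append.2 (Or.inl (List.mem_reverse.2 (hvpush v hadj hv)))
          · cases bs with
            | nil =>
              simp only [List.nil_append] at hzs
              rw [List.append_nil] at hws
              rcases List.mem_append.1 hw with hwc | hwu
              · have := hSI [u] w post (by rw [hzs]; rfl) hwc v hadj hvc
                rw [List.mem_singleton] at this
                exact absurd this hvne
              · rw [List.mem_singleton] at hwu
                subst hwu
                rw [← hws]
                exact List.mem_reverse.2 (hvpush v hadj hv)
            | cons x bs' =>
              have hwx : w = x := by
                have := congrArg (fun l => l.head?) hzs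
                simpa using this
              subst hwx
              have hwmem : w ∈ pushesA board (cur ++ [u]) u := by
                rw [← List.mem_reverse, hws]
                exact List.mem_append.2 (Or.inr (List.mem_cons_self))
              rw [mem_pushesA] at hwmem
              exact absurd hw hwmem.2.2
        · have e1 : eo board (insert u cur.toFinset)
              = eo board cur.toFinset + 2 * degIn board cur.toFinset u := eo_insert huP
          have e2 : degSum board (insert u cur.toFinset)
              = degSum board cur.toFinset + deg board u := degSum_insert huP
          have e3 : (pushesA board (cur ++ [u]) u).length
              + degIn board ((cur ++ [u]).toFinset) u = deg board u := length_pushesA hzu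
          rw [hPF, degIn_insert_self] at e3
          rw [hPF, e1, e2]
          simp only [List.length_append, List.length_reverse, List.length_cons,
            List.length_nil] at hcount ⊢
          omega
        · simp only [List.length_append, List.length_cons, List.length_nil]
          omega

lemma floodA_spec (board : List (List Int)) (s : Int × Int) (hzr : zrb board s = true) :
    (floodLoop board (4 * board.length * board.length + 2) [] [s]).toFinset = compF board s ∧
    2 * (floodLoop board (4 * board.length * board.length + 2) [] [s]).length
        + eo board (compF board s)
      = 2 + 2 * degSum board (compF board s) := by
  apply floodA_main board s hzr
  · intro v hv
    exact absurd hv (List.not_mem_nil)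
  · intro v hv
    rw [List.mem_singleton] at hv
    exact hv ▸ Relation.ReflTransGen.refl
  · intro u hu
    exact absurd hu (List.not_mem_nil)
  · exact Or.inr List.mem_cons_self
  · intro pre u post hsp hu
    exact absurd hu (List.not_mem_nil)
  · simp [eo, degSum]
  · simp only [List.length_nil]
    have h4 : 4 * board.length * board.length = 4 * (board.length * board.length) := by ring
    omega

-- ---------- the B-side flood fill ----------

def pushesB (board : List (List Int)) (visited : PySem.Set (Int × Int)) (u : Int × Int) :
    List (Int × Int) :=
  (pvDirs.filter (fun d => zrb board (u.1 + d.1, u.2 + d.2) &&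
      !(visited.contains (u.1 + d.1, u.2 + d.2)))).map (fun d => (u.1 + d.1, u.2 + d.2))

lemma mem_pushesB {board : List (List Int)} {visited : PySem.Set (Int × Int)}
    {u v : Int × Int} :
    v ∈ pushesB board visited u ↔ (v ∈ nbrs u ∧ zrb board v = true ∧ v ∉ visited) := by
  simp only [pushesB, List.mem_map, List.mem_filter, nbrs, Bool.and_eq_true,
    Bool.not_eq_eq_eq_not, Bool.not_true, PySem.Set.contains, List.contains_eq_mem,
    decide_eq_false_iff_not]
  constructor
  · rintro ⟨d, ⟨hd, hz, hnv⟩, rfl⟩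
    exact ⟨⟨d, hd, rfl⟩, hz, hnv⟩
  · rintro ⟨⟨d, hd, rfl⟩, hz, hnv⟩
    exact ⟨d, ⟨hd, hz, hnv⟩, rfl⟩

lemma nodup_pushesB (board : List (List Int)) (visited : PySem.Set (Int × Int))
    (u : Int × Int) : (pushesB board visited u).Nodup := by
  have hsub : (pushesB board visited u).Sublist (nbrs u) := by
    unfold pushesB nbrs
    exact List.Sublist.map _ List.filter_sublist
  exact hsub.nodup (nbrs_nodup u)

-- the inner `for` loop of B's flood: the pushes are exactly `pushesB` (each push marks its
-- cell visited, and the four candidate cells are pairwise distinct)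
lemma foldB_spec (board : List (List Int)) (u : Int × Int) :
    ∀ (ds : List (Int × Int)) (rest : List (Int × Int)) (visited : PySem.Set (Int × Int)),
    (ds.map (fun d => (u.1 + d.1, u.2 + d.2))).Nodup →
    (ds.foldl (fun (sv : List (Int × Int) × PySem.Set (Int × Int)) d =>
        if 0 ≤ (u.1 + d.1, u.2 + d.2).1 && (u.1 + d.1, u.2 + d.2).1 < (board.length : Int) &&
           0 ≤ (u.1 + d.1, u.2 + d.2).2 && (u.1 + d.1, u.2 + d.2).2 < (board.length : Int) &&
           pvAt board (u.1 + d.1, u.2 + d.2).1 (u.1 + d.1, u.2 + d.2).2 == 0 &&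
           !(sv.2.contains (u.1 + d.1, u.2 + d.2))
        then ((u.1 + d.1, u.2 + d.2) :: sv.1, sv.2.add (u.1 + d.1, u.2 + d.2)) else sv)
      (rest, visited))
    = (((ds.filter (fun d => zrb board (u.1 + d.1, u.2 + d.2) &&
          !(visited.contains (u.1 + d.1, u.2 + d.2)))).map
            (fun d => (u.1 + d.1, u.2 + d.2))).reverse ++ rest,
       visited ++ (ds.filter (fun d => zrb board (u.1 + d.1, u.2 + d.2) &&
          !(visited.contains (u.1 + d.1, u.2 + d.2)))).map (fun d => (u.1 + d.1, u.2 + d.2))) := by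
  intro ds
  induction ds with
  | nil => intro rest visited _; simp
  | cons d ds ih =>
    intro rest visited hnd
    rw [List.map_cons, List.nodup_cons] at hnd
    have hchain : (decide (0 ≤ (u.1 + d.1, u.2 + d.2).1) &&
        decide ((u.1 + d.1, u.2 + d.2).1 < (board.length : Int)) &&
        decide (0 ≤ (u.1 + d.1, u.2 + d.2).2) &&
        decide ((u.1 + d.1, u.2 + d.2).2 < (board.length : Int)) &&
        (pvAt board (u.1 + d.1, u.2 + d.2).1 (u.1 + d.1, u.2 + d.2).2 == 0))
        = zrb board (u.1 + d.1, u.2 + d.2) := by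
      rw [Bool.eq_iff_iff]
      simp [zrb]
      tauto
    rw [List.foldl_cons]
    show (ds.foldl _
        (if (decide (0 ≤ (u.1 + d.1, u.2 + d.2).1) &&
            decide ((u.1 + d.1, u.2 + d.2).1 < (board.length : Int)) &&
            decide (0 ≤ (u.1 + d.1, u.2 + d.2).2) &&
            decide ((u.1 + d.1, u.2 + d.2).2 < (board.length : Int)) &&
            (pvAt board (u.1 + d.1, u.2 + d.2).1 (u.1 + d.1, u.2 + d.2).2 == 0) &&
            !(visited.contains (u.1 + d.1, u.2 + d.2)))
          then ((u.1 + d.1, u.2 + d.2) :: rest, visited.add (u.1 + d.1, u.2 + d.2))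
          else (rest, visited))) = _
    rw [hchain]
    by_cases hc : (zrb board (u.1 + d.1, u.2 + d.2)
        && !(visited.contains (u.1 + d.1, u.2 + d.2))) = true
    · rw [if_pos hc]
      have hncont : visited.contains (u.1 + d.1, u.2 + d.2) = false := by
        have hc' := hc
        rw [Bool.and_eq_true] at hc'
        simpa using hc'.2
      have hadd : visited.add (u.1 + d.1, u.2 + d.2) = visited ++ [(u.1 + d.1, u.2 + d.2)] := by
        have hnm : (u.1 + d.1, u.2 + d.2) ∉ visited := by simpa using hncont
        simp [PySem.Set.add, hnm]
      rw [hadd, ih _ _ hnd.2]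
      have hfc : ds.filter (fun d' => zrb board (u.1 + d'.1, u.2 + d'.2) &&
            !((visited ++ [(u.1 + d.1, u.2 + d.2)]).contains (u.1 + d'.1, u.2 + d'.2)))
          = ds.filter (fun d' => zrb board (u.1 + d'.1, u.2 + d'.2) &&
            !(visited.contains (u.1 + d'.1, u.2 + d'.2))) := by
        apply List.filter_congr
        intro d' hd'
        have hne : (u.1 + d'.1, u.2 + d'.2) ≠ (u.1 + d.1, u.2 + d.2) := by
          intro h
          exact hnd.1 (h ▸ List.mem_map_of_mem hd')
        have hcont : ((visited ++ [(u.1 + d.1, u.2 + d.2)]).contains (u.1 + d'.1, u.2 + d'.2))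
            = (visited.contains (u.1 + d'.1, u.2 + d'.2)) := by
          rw [Bool.eq_iff_iff]
          simp [hne]
        rw [hcont]
      rw [hfc]
      have hfilter : (d :: ds).filter (fun d' => zrb board (u.1 + d'.1, u.2 + d'.2) &&
            !(visited.contains (u.1 + d'.1, u.2 + d'.2)))
          = d :: ds.filter (fun d' => zrb board (u.1 + d'.1, u.2 + d'.2) &&
            !(visited.contains (u.1 + d'.1, u.2 + d'.2))) := by
        simp only [List.filter_cons, hc, if_true]
      rw [hfilter, List.map_cons, List.reverse_cons, List.append_assoc]
      simp
    · rw [if_neg hc]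
      rw [ih _ _ hnd.2]
      have hfilter : (d :: ds).filter (fun d' => zrb board (u.1 + d'.1, u.2 + d'.2) &&
            !(visited.contains (u.1 + d'.1, u.2 + d'.2)))
          = ds.filter (fun d' => zrb board (u.1 + d'.1, u.2 + d'.2) &&
            !(visited.contains (u.1 + d'.1, u.2 + d'.2))) := by
        have hc0 : (zrb board (u.1 + d.1, u.2 + d.2)
            && !(visited.contains (u.1 + d.1, u.2 + d.2))) = false := by
          simpa using hc
        simp only [List.filter_cons, hc0, Bool.false_eq_true, if_false]
      rw [hfilter]

lemma floodB_main (board : List (List Int)) (s : Int × Int) (hzr : zrb board s = true) :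
    ∀ (fuel : Nat) (comp stack : List (Int × Int)) (visited visited₀ : PySem.Set (Int × Int)),
    (∀ v ∈ comp, Reach board s v) →
    (∀ v ∈ stack, Reach board s v) →
    (∀ u ∈ comp, ∀ v, adjb board u v = true → v ∈ comp ∨ v ∈ stack) →
    (s ∈ comp ∨ s ∈ stack) →
    (∀ x, x ∈ visited ↔ (x ∈ visited₀ ∨ x ∈ comp ∨ x ∈ stack)) →
    (∀ x ∈ visited₀, ¬ Reach board s x) →
    (comp ++ stack).Nodup →
    board.length * board.length + 1 ≤ fuel + comp.length →
    ((floodAlt board fuel comp stack visited).1.toFinset = compF board s) ∧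
    (∀ x, x ∈ (floodAlt board fuel comp stack visited).2 ↔
      (x ∈ visited₀ ∨ x ∈ compF board s)) := by
  intro fuel
  induction fuel with
  | zero =>
    intro comp stack visited visited₀ h1 h2 hCL hs hV hD hnd hfuel
    exfalso
    have hcnd : comp.Nodup := (List.nodup_append.1 hnd).1
    have hsub : ∀ v ∈ comp.toFinset, zrb board v = true := by
      intro v hv
      exact reach_zr (h1 v (List.mem_toFinset.1 hv)) hzr
    have hcard : comp.toFinset.card ≤ board.length * board.length := card_le_N hsub
    have hlen : comp.toFinset.card = comp.length := List.toFinset_card_of_nodup hcnd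
    omega
  | succ fuel ih =>
    intro comp stack visited visited₀ h1 h2 hCL hs hV hD hnd hfuel
    cases stack with
    | nil =>
      show ((comp, visited).1.toFinset = _) ∧ _
      have hset : comp.toFinset = compF board s := by
        apply floodA_terminal hzr h1
        · intro w hw v hadj
          rcases hCL w hw v hadj with h | h
          · exact h
          · exact absurd h (List.not_mem_nil)
        · rcases hs with h | h
          · exact h
          · exact absurd h (List.not_mem_nil)
      refine ⟨hset, ?_⟩
      intro x
      show x ∈ visited ↔ _
      rw [hV x, ← hset, List.mem_toFinset]
      constructor
      · rintro (h | h | h)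
        · exact Or.inl h
        · exact Or.inr h
        · exact absurd h (List.not_mem_nil)
      · rintro (h | h)
        · exact Or.inl h
        · exact Or.inr (Or.inl h)
    | cons u rest =>
      have hzu : zrb board u = true := reach_zr (h2 u List.mem_cons_self) hzr
      have hureach : Reach board s u := h2 u List.mem_cons_self
      have hstep : floodAlt board (fuel + 1) comp (u :: rest) visited
          = floodAlt board fuel (comp ++ [u]) ((pushesB board visited u).reverse ++ rest)
              (visited ++ pushesB board visited u) := by
        show floodAlt board fuel (comp ++ [u])
            (pvDirs.foldl _ (rest, visited)).1 (pvDirs.foldl _ (rest, visited)).2 = _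
        rw [foldB_spec board u pvDirs rest visited (nbrs_nodup u)]
        rfl
      rw [hstep]
      have hmemv : ∀ x, x ∈ visited ++ pushesB board visited u ↔
          x ∈ visited ∨ x ∈ pushesB board visited u := fun x => List.mem_append
      have hpush_reach : ∀ v ∈ pushesB board visited u, Reach board s v := by
        intro v hv
        rw [mem_pushesB] at hv
        exact hureach.tail (by simp [adjb, hzu, hv.2.1, hv.1])
      apply ih
      · intro v hv
        rcases List.mem_append.1 hv with h | h
        · exact h1 v h
        · rw [List.mem_singleton] at h
          exact h ▸ hureach
      · intro v hv
        rcases List.mem_append.1 hv with h | h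
        · exact hpush_reach v (List.mem_reverse.1 h)
        · exact h2 v (List.mem_cons_of_mem u h)
      · intro w hw v hadj
        rcases List.mem_append.1 hw with h | h
        · rcases hCL w h v hadj with h' | h'
          · exact Or.inl (List.mem_append.2 (Or.inl h'))
          · rcases List.mem_cons.1 h' with h'' | h''
            · exact Or.inl (List.mem_append.2 (Or.inr (by simp [h''])))
            · exact Or.inr (List.mem_append.2 (Or.inr h''))
        · rw [List.mem_singleton] at h
          rw [h] at hadj
          have hvreach : Reach board s v := hureach.tail hadj
          by_cases hvv : v ∈ visited
          · rcases (hV v).1 hvv with h' | h' | h'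
            · exact absurd hvreach (hD v h')
            · exact Or.inl (List.mem_append.2 (Or.inl h'))
            · rcases List.mem_cons.1 h' with h'' | h''
              · exact Or.inl (List.mem_append.2 (Or.inr (by simp [h''])))
              · exact Or.inr (List.mem_append.2 (Or.inr h''))
          · have : v ∈ pushesB board visited u := by
              rw [mem_pushesB]
              simp only [adjb, Bool.and_eq_true, decide_eq_true_eq] at hadj
              exact ⟨hadj.2, hadj.1.2, hvv⟩
            exact Or.inr (List.mem_append.2 (Or.inl (List.mem_reverse.2 this)))
      · rcases hs with h | h
        · exact Or.inl (List.mem_append.2 (Or.inl h))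
        · rcases List.mem_cons.1 h with h' | h'
          · exact Or.inl (List.mem_append.2 (Or.inr (by simp [h'])))
          · exact Or.inr (List.mem_append.2 (Or.inr h'))
      · intro x
        rw [hmemv x, hV x]
        simp only [List.mem_append, List.mem_reverse, List.mem_cons]
        tauto
      · exact hD
      · -- Nodup of the new comp ++ stack
        have hpn : (pushesB board visited u).Nodup := nodup_pushesB board visited u
        have holdn : (comp ++ [u] ++ rest).Nodup := by
          have : comp ++ u :: rest = comp ++ [u] ++ rest := by simp
          rw [← this]
          exact hnd
        have hdisj : ∀ a ∈ comp ++ [u] ++ rest, ∀ b ∈ pushesB board visited u, a ≠ b := by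
          intro a ha b hb
          rw [mem_pushesB] at hb
          intro hab
          subst hab
          apply hb.2.2
          rw [hV a]
          rcases List.mem_append.1 ha with h | h
          · rcases List.mem_append.1 h with h' | h'
            · exact Or.inr (Or.inl h')
            · rw [List.mem_singleton] at h'
              exact Or.inr (Or.inr (by simp [h']))
          · exact Or.inr (Or.inr (List.mem_cons_of_mem u h))
        have hperm : (comp ++ [u] ++ ((pushesB board visited u).reverse ++ rest)).Perm
            ((comp ++ [u] ++ rest) ++ pushesB board visited u) := by
          have hp1 : (comp ++ [u] ++ ((pushesB board visited u).reverse ++ rest)).Perm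
              (comp ++ [u] ++ (rest ++ (pushesB board visited u).reverse)) :=
            List.Perm.append_left _ List.perm_append_comm
          have hp3 : ((comp ++ [u] ++ rest) ++ (pushesB board visited u).reverse).Perm
              ((comp ++ [u] ++ rest) ++ pushesB board visited u) :=
            List.Perm.append_left _ (List.reverse_perm _)
          refine hp1.trans ?_
          rw [← List.append_assoc]
          exact hp3
        apply hperm.symm.nodup
        rw [List.nodup_append]
        exact ⟨holdn, hpn, hdisj⟩
      · simp only [List.length_append, List.length_cons, List.length_nil]
        omega

-- ---------- outer scan ----------

def wallTile (board : List (List Int)) (t : Int × Int) : Bool :=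
  pvDirs.any (fun d => wallB board (t.1 + d.1, t.2 + d.2))

-- A's `unique` computation, inner loop
lemma foldl_inner_unique (river : List (Int × Int)) :
    ∀ (current : List (Int × Int)) (u : Bool),
    current.foldl (fun u2 tile => if river.contains tile then false else u2) u
      = (u && !(current.any (fun t => river.contains t))) := by
  intro current
  induction current with
  | nil => intro u; simp
  | cons t ts ih =>
    intro u
    rw [List.foldl_cons]
    by_cases h : river.contains t = true
    · rw [if_pos h, ih, List.any_cons, h]
      simp
    · have h' : river.contains t = false := by simpa using h
      rw [if_neg h, ih, List.any_cons, h']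
      simp

-- A's `unique` computation, outer loop
lemma foldl_outer_unique (current : List (Int × Int)) :
    ∀ (rs : List (List (Int × Int))) (u : Bool),
    rs.foldl (fun u river => if current.length = river.length then
        current.foldl (fun u2 tile => if river.contains tile then false else u2) u else u) u
      = (u && !(rs.any (fun river => (current.length == river.length)
          && current.any (fun t => river.contains t)))) := by
  intro rs
  induction rs with
  | nil => intro u; simp
  | cons r rs ih =>
    intro u
    rw [List.foldl_cons, List.any_cons]
    by_cases h : current.length = r.length
    · rw [if_pos h, foldl_inner_unique, ih]
      have hb : (current.length == r.length) = true := by simp [h]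
      rw [hb]
      cases u <;> cases current.any (fun t => r.contains t) <;>
        cases rs.any (fun river => (current.length == river.length)
          && current.any (fun t => river.contains t)) <;> rfl
    · rw [if_neg h, ih]
      have hb : (current.length == r.length) = false := by simp [h]
      rw [hb]
      cases u <;> rfl

lemma foldl_count_int {α : Type} (p : α → Bool) :
    ∀ (l : List α) (v : Int),
    l.foldl (fun v x => if p x then v + 1 else v) v = v + ((l.filter p).length : Int) := by
  intro l
  induction l with
  | nil => intro v; simp
  | cons x t ih =>
    intro v
    rw [List.foldl_cons, List.filter_cons]
    by_cases h : p x = true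
    · rw [if_pos h, if_pos h, ih, List.length_cons]
      push_cast
      ring
    · have h' : p x = false := by simpa using h
      rw [h', if_neg (by simp), ih]
      simp

-- A's `expansions` inner (direction) loop counts exactly the walls next to the tile
lemma dirs_fold_expansions (board : List (List Int)) (t : Int × Int) :
    ∀ (ds : List (Int × Int)) (e : Int),
    ds.foldl (fun e d =>
        if !(inBoard board (t.1 + d.1) (t.2 + d.2)) then e
        else if pvAt board (t.1 + d.1) (t.2 + d.2) == 0 then e
        else if pvAt board (t.1 + d.1) (t.2 + d.2) == -1 then e + 1 else e) e
      = e + (((ds.filter (fun d => wallB board (t.1 + d.1, t.2 + d.2)))).length : Int) := by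
  intro ds
  induction ds with
  | nil => intro e; simp
  | cons d ds ih =>
    intro e
    rw [List.foldl_cons, List.filter_cons]
    have hstep : (if !(inBoard board (t.1 + d.1) (t.2 + d.2)) then e
        else if pvAt board (t.1 + d.1) (t.2 + d.2) == 0 then e
        else if pvAt board (t.1 + d.1) (t.2 + d.2) == -1 then e + 1 else e)
        = (if wallB board (t.1 + d.1, t.2 + d.2) then e + 1 else e) := by
      by_cases hib : inBoard board (t.1 + d.1) (t.2 + d.2) = true
      · by_cases hz : pvAt board (t.1 + d.1) (t.2 + d.2) = 0
        · have hw : wallB board (t.1 + d.1, t.2 + d.2) = false := by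
            simp [wallB, hz]
          simp [hib, hz, hw]
        · by_cases hm : pvAt board (t.1 + d.1) (t.2 + d.2) = -1
          · have hw : wallB board (t.1 + d.1, t.2 + d.2) = true := by
              rw [inBoard_iff] at hib
              simp [wallB, hm]
              omega
            simp [hib, hm, hw]
          · have hw : wallB board (t.1 + d.1, t.2 + d.2) = false := by
              simp [wallB, hm]
            simp [hib, hz, hm, hw]
      · have hib' : inBoard board (t.1 + d.1) (t.2 + d.2) = false := by simpa using hib
        have hw : wallB board (t.1 + d.1, t.2 + d.2) = false := by
          rw [Bool.eq_false_iff]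
          intro hcon
          simp only [wallB, Bool.and_eq_true, decide_eq_true_eq] at hcon
          rw [Bool.eq_false_iff] at hib'
          exact hib' ((inBoard_iff board _ _).2 (by exact_mod_cast hcon.1))
        simp [hib', hw]
    rw [hstep]
    by_cases hw : wallB board (t.1 + d.1, t.2 + d.2) = true
    · rw [if_pos hw, if_pos hw, ih, List.length_cons]
      push_cast
      ring
    · have hw' : wallB board (t.1 + d.1, t.2 + d.2) = false := by simpa using hw
      rw [hw', if_neg (by simp), ih]
      simp

-- A's per-river `expansions` is positive iff some tile of the river touches a wall
lemma expansions_pos_iff (board : List (List Int)) (river : List (Int × Int)) :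
    (0 < river.foldl (fun e tile =>
        pvDirs.foldl (fun e d =>
          if !(inBoard board (tile.1 + d.1) (tile.2 + d.2)) then e
          else if pvAt board (tile.1 + d.1) (tile.2 + d.2) == 0 then e
          else if pvAt board (tile.1 + d.1) (tile.2 + d.2) == -1 then e + 1 else e) e) (0 : Int))
      ↔ river.any (fun t => wallTile board t) = true := by
  have hFun : (fun (e : Int) (tile : Int × Int) =>
      pvDirs.foldl (fun e d =>
          if !(inBoard board (tile.1 + d.1) (tile.2 + d.2)) then e
          else if pvAt board (tile.1 + d.1) (tile.2 + d.2) == 0 then e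
          else if pvAt board (tile.1 + d.1) (tile.2 + d.2) == -1 then e + 1 else e) e)
      = (fun (e : Int) (tile : Int × Int) => e + (((pvDirs.filter
          (fun d => wallB board (tile.1 + d.1, tile.2 + d.2)))).length : Int)) :=
    funext (fun e => funext (fun tile => dirs_fold_expansions board tile pvDirs e))
  rw [hFun]
  have hwt : ∀ t : Int × Int, wallTile board t = true ↔
      (0 : Int) < ((pvDirs.filter
        (fun d => wallB board (t.1 + d.1, t.2 + d.2))).length : Int) := by
    intro t
    rw [wallTile, List.any_eq_true]
    constructor
    · rintro ⟨d, hd, hw⟩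
      have hm : d ∈ pvDirs.filter (fun d => wallB board (t.1 + d.1, t.2 + d.2)) :=
        List.mem_filter.2 ⟨hd, hw⟩
      have := List.length_pos_of_mem hm
      exact_mod_cast this
    · intro hpos
      have : 0 < (pvDirs.filter (fun d => wallB board (t.1 + d.1, t.2 + d.2))).length := by
        exact_mod_cast hpos
      obtain ⟨d, hd⟩ := List.exists_mem_of_length_pos this
      exact ⟨d, (List.mem_filter.1 hd).1, (List.mem_filter.1 hd).2⟩
  have hsum : ∀ (l : List (Int × Int)) (e : Int),
      l.foldl (fun e tile => e + (((pvDirs.filter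
          (fun d => wallB board (tile.1 + d.1, tile.2 + d.2)))).length : Int)) e
        = e + (l.map (fun tile => (((pvDirs.filter
          (fun d => wallB board (tile.1 + d.1, tile.2 + d.2)))).length : Int))).sum := by
    intro l
    induction l with
    | nil => intro e; simp
    | cons t ts ih =>
      intro e
      rw [List.foldl_cons, ih, List.map_cons, List.sum_cons]
      ring
  rw [hsum]
  have hpos : ∀ (l : List (Int × Int)),
      (0 < (l.map (fun tile => (((pvDirs.filter
          (fun d => wallB board (tile.1 + d.1, tile.2 + d.2)))).length : Int))).sum
        ↔ l.any (fun t => wallTile board t) = true) := by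
    intro l
    induction l with
    | nil => simp
    | cons t ts ih =>
      rw [List.map_cons, List.sum_cons, List.any_cons, Bool.or_eq_true, ← ih]
      have h1 : (0 : Int) ≤ ((pvDirs.filter
          (fun d => wallB board (t.1 + d.1, t.2 + d.2))).length : Int) := by positivity
      have h2 : (0 : Int) ≤ (ts.map (fun tile => (((pvDirs.filter
          (fun d => wallB board (tile.1 + d.1, tile.2 + d.2)))).length : Int))).sum := by
        apply List.sum_nonneg
        intro x hx
        obtain ⟨tile, _, rfl⟩ := List.mem_map.1 hx
        positivity
      rw [hwt t]
      omega
  rw [zero_add]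
  exact hpos river

noncomputable def compsOf (board : List (List Int)) :
    List (Int × Int) → List (Finset (Int × Int)) → List (Finset (Int × Int))
  | [], acc => acc
  | c :: cs, acc =>
    compsOf board cs
      (if zrb board c = true ∧ compF board c ∉ acc then acc ++ [compF board c] else acc)

def cellsOf (board : List (List Int)) : List (Int × Int) :=
  (PySem.List.pyRange 0 (board.length : Int) 1).flatMap
    (fun i => (PySem.List.pyRange 0 (board.length : Int) 1).map (fun j => (i, j)))

lemma foldl_pairs {α σ : Type} (l₁ l₂ : List α) (g : σ → α × α → σ) (init : σ) :
    l₁.foldl (fun acc i => l₂.foldl (fun acc j => g acc (i, j)) acc) init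
      = (l₁.flatMap (fun i => l₂.map (fun j => (i, j)))).foldl g init := by
  induction l₁ generalizing init with
  | nil => rfl
  | cons x t ih => simp only [List.flatMap_cons, List.foldl_append, List.foldl_map, ih,
      List.foldl_cons]

-- A's per-cell step, as a function of the cell
def stepAF (board : List (List Int)) (rivers : List (List (Int × Int))) (c : Int × Int) :
    List (List (Int × Int)) :=
  if pvAt board c.1 c.2 == 0 then
    let current := floodLoop board (4 * board.length * board.length + 2) [] [c]
    let rivers1 := if rivers.length = 0 then rivers ++ [current] else rivers
    let unique := rivers1.foldl (fun u river =>
      if current.length = river.length then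
        current.foldl (fun u2 tile => if river.contains tile then false else u2) u
      else u) true
    if unique then rivers1 ++ [current] else rivers1
  else rivers

-- B's per-cell step, as a function of the cell
def stepBF (board : List (List Int)) (st : PySem.Set (Int × Int) × Int × Int)
    (c : Int × Int) : PySem.Set (Int × Int) × Int × Int :=
  if pvAt board c.1 c.2 == 0 && !(st.1.contains c) then
    let r := floodAlt board (board.length * board.length + 2) [] [c] (st.1.add c)
    let walledHere := r.1.any (fun t => pvDirs.any (fun d =>
        0 ≤ t.1 + d.1 && t.1 + d.1 < (board.length : Int) &&
        0 ≤ t.2 + d.2 && t.2 + d.2 < (board.length : Int) &&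
        pvAt board (t.1 + d.1) (t.2 + d.2) == -1))
    (r.2, st.2.1 + 1, st.2.2 + (if walledHere then 1 else 0))
  else st

lemma findRivers_eq (board : List (List Int)) :
    findRivers board = (cellsOf board).foldl (stepAF board) [] := by
  unfold findRivers cellsOf
  rw [← foldl_pairs]
  rfl

lemma alt_eq (board : List (List Int)) :
    isolatedRiver_alt board =
      (let st := (cellsOf board).foldl (stepBF board)
          ((PySem.Set.empty : PySem.Set (Int × Int)), (0 : Int), (0 : Int))
       if st.2.1 = 1 then none
       else if st.2.2 = st.2.1 then some false else some true) := by
  unfold isolatedRiver_alt cellsOf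
  rw [← foldl_pairs]
  rfl

lemma wallB_eq_chain (board : List (List Int)) (p : Int × Int) :
    (decide (0 ≤ p.1) && decide (p.1 < (board.length : Int)) &&
     decide (0 ≤ p.2) && decide (p.2 < (board.length : Int)) &&
     (pvAt board p.1 p.2 == -1)) = wallB board p := by
  rw [Bool.eq_iff_iff]
  simp only [wallB, Bool.and_eq_true, decide_eq_true_eq]
  tauto

lemma walled_eq (board : List (List Int)) (comp : List (Int × Int)) :
    comp.any (fun t => pvDirs.any (fun d =>
        0 ≤ t.1 + d.1 && t.1 + d.1 < (board.length : Int) &&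
        0 ≤ t.2 + d.2 && t.2 + d.2 < (board.length : Int) &&
        pvAt board (t.1 + d.1) (t.2 + d.2) == -1))
      = comp.any (fun t => wallTile board t) := by
  have hf : (fun (t : Int × Int) => pvDirs.any (fun d =>
        0 ≤ t.1 + d.1 && t.1 + d.1 < (board.length : Int) &&
        0 ≤ t.2 + d.2 && t.2 + d.2 < (board.length : Int) &&
        pvAt board (t.1 + d.1) (t.2 + d.2) == -1))
      = (fun t => wallTile board t) := by
    funext t
    unfold wallTile
    congr 1
    funext d
    exact wallB_eq_chain board (t.1 + d.1, t.2 + d.2)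
  rw [hf]

lemma any_eq_decide_finset (comp : List (Int × Int)) (C : Finset (Int × Int))
    (h : comp.toFinset = C) (p : (Int × Int) → Bool) :
    comp.any p = decide (∃ u ∈ C, p u = true) := by
  rw [Bool.eq_iff_iff, List.any_eq_true, decide_eq_true_eq]
  subst h
  constructor
  · rintro ⟨t, ht, hp⟩
    exact ⟨t, List.mem_toFinset.2 ht, hp⟩
  · rintro ⟨t, ht, hp⟩
    exact ⟨t, List.mem_toFinset.1 ht, hp⟩

lemma zrb_parts {board : List (List Int)} {c : Int × Int} (hz : zrb board c = true) :
    (pvAt board c.1 c.2 == 0) = true := by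
  simp only [zrb, Bool.and_eq_true] at hz
  exact hz.2

lemma current_ne_nil {board : List (List Int)} {c : Int × Int} {cur : List (Int × Int)}
    (hz : zrb board c = true) (hset : cur.toFinset = compF board c) : cur ≠ [] := by
  intro h
  subst h
  have := self_mem_compF hz
  rw [← hset] at this
  simp at this

lemma scan_par (board : List (List Int)) :
    ∀ (cs : List (Int × Int)) (rivers : List (List (Int × Int)))
      (visited : PySem.Set (Int × Int)) (rc wc : Int) (acc : List (Finset (Int × Int))),
    (∀ c ∈ cs, 0 ≤ c.1 ∧ c.1 < (board.length : Int) ∧ 0 ≤ c.2 ∧ c.2 < (board.length : Int)) →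
    rivers.map List.toFinset = acc →
    (∀ r ∈ rivers, r ≠ [] ∧
      2 * r.length + eo board r.toFinset = 2 + 2 * degSum board r.toFinset) →
    (∀ C ∈ acc, ∃ t, zrb board t = true ∧ C = compF board t) →
    (∀ x, x ∈ visited ↔ ∃ C ∈ acc, x ∈ C) →
    rc = (acc.length : Int) →
    wc = ((acc.filter (fun C => decide (∃ u ∈ C, wallTile board u = true))).length : Int) →
    ((cs.foldl (stepAF board) rivers).map List.toFinset = compsOf board cs acc
     ∧ (∀ r ∈ cs.foldl (stepAF board) rivers, r ≠ [] ∧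
        2 * r.length + eo board r.toFinset = 2 + 2 * degSum board r.toFinset)
     ∧ (∀ C ∈ compsOf board cs acc, ∃ t, zrb board t = true ∧ C = compF board t)
     ∧ (∀ x, x ∈ (cs.foldl (stepBF board) (visited, rc, wc)).1 ↔
          ∃ C ∈ compsOf board cs acc, x ∈ C)
     ∧ (cs.foldl (stepBF board) (visited, rc, wc)).2.1 = ((compsOf board cs acc).length : Int)
     ∧ (cs.foldl (stepBF board) (visited, rc, wc)).2.2
        = (((compsOf board cs acc).filter
            (fun C => decide (∃ u ∈ C, wallTile board u = true))).length : Int)) := by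
  intro cs
  induction cs with
  | nil =>
    intro rivers visited rc wc acc hcs hmap hlaw hrep hV hrc hwc
    simp only [compsOf, List.foldl_nil]
    exact ⟨hmap, hlaw, hrep, hV, hrc, hwc⟩
  | cons c cs ih =>
    intro rivers visited rc wc acc hcs hmap hlaw hrep hV hrc hwc
    have hcr := hcs c List.mem_cons_self
    have hcs' : ∀ c' ∈ cs, 0 ≤ c'.1 ∧ c'.1 < (board.length : Int) ∧
        0 ≤ c'.2 ∧ c'.2 < (board.length : Int) := fun c' h => hcs c' (List.mem_cons_of_mem _ h)
    rw [List.foldl_cons, List.foldl_cons]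
    have hcomps : compsOf board (c :: cs) acc = compsOf board cs
        (if zrb board c = true ∧ compF board c ∉ acc then acc ++ [compF board c] else acc) := by
      simp only [compsOf]
    rw [hcomps]
    by_cases hz : zrb board c = true
    · -- c is a river tile
      have hz0 : (pvAt board c.1 c.2 == 0) = true := zrb_parts hz
      have hflood := floodA_spec board c hz
      obtain ⟨hcset, hclaw⟩ := hflood
      have hcne : floodLoop board (4 * board.length * board.length + 2) [] [c] ≠ [] :=
        current_ne_nil hz hcset
      obtain ⟨t0, ht0⟩ := List.exists_mem_of_ne_nil _ hcne
      have ht0c : t0 ∈ compF board c := by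
        rw [← hcset]
        exact List.mem_toFinset.2 ht0
      by_cases hin : compF board c ∈ acc
      · -- component already collected: A drops the flood, B skips the cell
        obtain ⟨r0, hr0m, hr0⟩ : ∃ r ∈ rivers, r.toFinset = compF board c := by
          rw [← hmap] at hin
          exact List.mem_map.1 hin
        have hrne : rivers.length ≠ 0 := by
          intro h
          rw [List.length_eq_zero_iff] at h
          subst h
          exact absurd hr0m List.not_mem_nil
        have hpred : rivers.any (fun river =>
            ((floodLoop board (4 * board.length * board.length + 2) [] [c]).length
              == river.length) &&
            (floodLoop board (4 * board.length * board.length + 2) [] [c]).any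
              (fun t => river.contains t)) = true := by
          rw [List.any_eq_true]
          refine ⟨r0, hr0m, ?_⟩
          have hlen0 : (floodLoop board (4 * board.length * board.length + 2) [] [c]).length
              = r0.length := by
            have h2 := (hlaw r0 hr0m).2
            rw [hr0] at h2
            omega
          rw [Bool.and_eq_true]
          refine ⟨by simp [hlen0], ?_⟩
          rw [List.any_eq_true]
          refine ⟨t0, ht0, ?_⟩
          rw [List.contains_iff_mem, ← List.mem_toFinset, hr0]
          exact ht0c
        have hA : stepAF board rivers c = rivers := by
          unfold stepAF
          rw [if_pos hz0]
          show (if (if rivers.length = 0 then _ else rivers).foldl _ true = true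
              then _ else _) = rivers
          rw [if_neg hrne, foldl_outer_unique, Bool.true_and, hpred]
          simp
        have hcv : c ∈ visited := by
          rw [hV c]
          exact ⟨compF board c, hin, self_mem_compF hz⟩
        have hB : stepBF board (visited, rc, wc) c = (visited, rc, wc) := by
          unfold stepBF
          have hcont : visited.contains c = true := List.contains_iff_mem.2 hcv
          rw [if_neg (by simp; intro _; exact hcv)]
        rw [hA, hB, if_neg (by tauto)]
        exact ih rivers visited rc wc acc hcs' hmap hlaw hrep hV hrc hwc
      · -- a fresh component: A appends its flood, B floods it too
        have hdisj : ∀ C ∈ acc, ∀ x, x ∈ C → x ∉ compF board c := by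
          intro C hC x hxC hxc
          obtain ⟨t, hzt, rfl⟩ := hrep C hC
          rcases compF_eq_or_disjoint hzt hz with he | hd
          · exact hin (he ▸ hC)
          · exact hd x hxC hxc
        have hcnv : c ∉ visited := by
          intro hcv
          obtain ⟨C, hC, hcC⟩ := (hV c).1 hcv
          exact hdisj C hC c hcC (self_mem_compF hz)
        -- A's side
        have hA : stepAF board rivers c
            = rivers ++ [floodLoop board (4 * board.length * board.length + 2) [] [c]] := by
          unfold stepAF
          rw [if_pos hz0]
          show (if (if rivers.length = 0 then _ else rivers).foldl _ true = true
              then _ else _) = _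
          by_cases hre : rivers.length = 0
          · rw [List.length_eq_zero_iff] at hre
            subst hre
            have h0 : (if ([] : List (List (Int × Int))).length = 0
                then ([] : List (List (Int × Int)))
                  ++ [floodLoop board (4 * board.length * board.length + 2) [] [c]]
                else []) = [floodLoop board (4 * board.length * board.length + 2) [] [c]] := by
              simp
            rw [h0, foldl_outer_unique, Bool.true_and]
            have hself : ([(floodLoop board (4 * board.length * board.length + 2) [] [c])].any
                (fun river =>
                  ((floodLoop board (4 * board.length * board.length + 2) [] [c]).length
                    == river.length) &&
                  (floodLoop board (4 * board.length * board.length + 2) [] [c]).any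
                    (fun t => river.contains t))) = true := by
              rw [List.any_eq_true]
              refine ⟨_, List.mem_singleton.2 rfl, ?_⟩
              rw [Bool.and_eq_true]
              refine ⟨by simp, ?_⟩
              rw [List.any_eq_true]
              exact ⟨t0, ht0, List.contains_iff_mem.2 ht0⟩
            rw [hself]
            simp
          · rw [if_neg hre, foldl_outer_unique, Bool.true_and]
            have hnone : rivers.any (fun river =>
                ((floodLoop board (4 * board.length * board.length + 2) [] [c]).length
                  == river.length) &&
                (floodLoop board (4 * board.length * board.length + 2) [] [c]).any
                  (fun t => river.contains t)) = false := by
              rw [List.any_eq_false]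
              intro r hr
              rw [Bool.and_eq_true, not_and]
              intro _
              rw [List.any_eq_true]
              rintro ⟨t, ht, htr⟩
              have htc : t ∈ compF board c := by
                rw [← hcset]
                exact List.mem_toFinset.2 ht
              have htr' : t ∈ r.toFinset := List.mem_toFinset.2 (List.contains_iff_mem.1 htr)
              have hrin : r.toFinset ∈ acc := by
                rw [← hmap]
                exact List.mem_map_of_mem hr
              exact hdisj _ hrin t htr' htc
            rw [hnone]
            simp
        -- B's side
        have hBflood := floodB_main board c hz (board.length * board.length + 2) [] [c]
          (visited.add c) visited
          (fun v hv => absurd hv List.not_mem_nil)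
          (fun v hv => by rw [List.mem_singleton] at hv; exact hv ▸ Relation.ReflTransGen.refl)
          (fun u hu => absurd hu List.not_mem_nil)
          (Or.inr List.mem_cons_self)
          (fun x => by
            rw [PySem.Set.mem_add]
            simp only [List.not_mem_nil, false_or, List.mem_singleton])
          (fun x hx hreach => by
            obtain ⟨C, hC, hxC⟩ := (hV x).1 hx
            exact hdisj C hC x hxC ((mem_compF hz).2 hreach))
          (by simp)
          (by simp only [List.length_nil]; omega)
        obtain ⟨hfset, hfvis⟩ := hBflood
        have hB : stepBF board (visited, rc, wc) c
            = ((floodAlt board (board.length * board.length + 2) [] [c] (visited.add c)).2,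
               rc + 1,
               wc + (if decide (∃ u ∈ compF board c, wallTile board u = true) = true
                  then 1 else 0)) := by
          unfold stepBF
          have hcont : visited.contains c = false := by
            rw [Bool.eq_false_iff]
            intro hcon
            exact hcnv (List.contains_iff_mem.1 hcon)
          rw [if_pos (by simp [hz0]; exact hcnv)]
          show ((floodAlt board (board.length * board.length + 2) [] [c] (visited.add c)).2,
              rc + 1, wc + _) = _
          have hwall : (floodAlt board (board.length * board.length + 2) [] [c]
                (visited.add c)).1.any (fun t => pvDirs.any (fun d =>
                0 ≤ t.1 + d.1 && t.1 + d.1 < (board.length : Int) &&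
                0 ≤ t.2 + d.2 && t.2 + d.2 < (board.length : Int) &&
                pvAt board (t.1 + d.1) (t.2 + d.2) == -1))
              = decide (∃ u ∈ compF board c, wallTile board u = true) := by
            rw [walled_eq]
            exact any_eq_decide_finset _ _ hfset _
          rw [hwall]
        rw [hA, hB, if_pos ⟨hz, hin⟩]
        apply ih
        · exact hcs'
        · -- map
          rw [List.map_append, hmap]
          simp [hcset]
        · intro r hr
          rcases List.mem_append.1 hr with h | h
          · exact hlaw r h
          · rw [List.mem_singleton] at h
            subst h
            refine ⟨hcne, ?_⟩
            rw [hcset]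
            exact hclaw
        · intro C hC
          rcases List.mem_append.1 hC with h | h
          · exact hrep C h
          · rw [List.mem_singleton] at h
            exact ⟨c, hz, h⟩
        · intro x
          rw [hfvis x]
          constructor
          · rintro (h | h)
            · obtain ⟨C, hC, hxC⟩ := (hV x).1 h
              exact ⟨C, List.mem_append.2 (Or.inl hC), hxC⟩
            · exact ⟨compF board c, List.mem_append.2 (Or.inr (List.mem_singleton.2 rfl)), h⟩
          · rintro ⟨C, hC, hxC⟩
            rcases List.mem_append.1 hC with h | h
            · exact Or.inl ((hV x).2 ⟨C, h, hxC⟩)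
            · rw [List.mem_singleton] at h
              exact Or.inr (h ▸ hxC)
        · rw [hrc, List.length_append]
          simp
        · rw [hwc, List.filter_append, List.length_append]
          rw [List.filter_singleton]
          by_cases hvC : decide (∃ u ∈ compF board c, wallTile board u = true) = true
          · rw [hvC]
            simp
          · have hvC' : decide (∃ u ∈ compF board c, wallTile board u = true) = false := by
              simpa using hvC
            rw [hvC']
            simp
    · -- not a river tile: both sides skip, the component list is unchanged
      have hz0 : (pvAt board c.1 c.2 == 0) = false := by
        cases hq : (pvAt board c.1 c.2 == 0) with
        | false => rfl
        | true =>
          exfalso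
          apply hz
          simp only [zrb, hq, Bool.and_true, decide_eq_true_eq]
          exact ⟨hcr.1, hcr.2.1, hcr.2.2.1, hcr.2.2.2⟩
      have hA : stepAF board rivers c = rivers := by
        unfold stepAF
        rw [if_neg (by simp [hz0])]
      have hB : stepBF board (visited, rc, wc) c = (visited, rc, wc) := by
        unfold stepBF
        rw [if_neg (by simp [hz0])]
      rw [hA, hB, if_neg (by tauto)]
      exact ih rivers visited rc wc acc hcs' hmap hlaw hrep hV hrc hwc

def validCount (board : List (List Int)) (rch : List (List (Int × Int))) : Int :=
  rch.foldl (fun (v : Int) river =>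
    let expansions : Int := river.foldl (fun e tile =>
      pvDirs.foldl (fun e d =>
        if !(inBoard board (tile.1 + d.1) (tile.2 + d.2)) then e
        else if pvAt board (tile.1 + d.1) (tile.2 + d.2) == 0 then e
        else if pvAt board (tile.1 + d.1) (tile.2 + d.2) == -1 then e + 1 else e) e) (0 : Int)
    if expansions > 0 then v + 1 else v) (0 : Int)

lemma isoA_eq (board : List (List Int)) :
    isolatedRiver board = (if (findRivers board).length = 1 then none
      else if validCount board (findRivers board) = ((findRivers board).length : Int)
        then some false else some true) := rfl

lemma validCount_eq (board : List (List Int)) (rch : List (List (Int × Int))) :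
    validCount board rch
      = (((rch.filter (fun r => r.any (fun t => wallTile board t)))).length : Int) := by
  unfold validCount
  have hfun : (fun (v : Int) (river : List (Int × Int)) =>
      let expansions : Int := river.foldl (fun e tile =>
        pvDirs.foldl (fun e d =>
          if !(inBoard board (tile.1 + d.1) (tile.2 + d.2)) then e
          else if pvAt board (tile.1 + d.1) (tile.2 + d.2) == 0 then e
          else if pvAt board (tile.1 + d.1) (tile.2 + d.2) == -1 then e + 1 else e) e) (0 : Int)
      if expansions > 0 then v + 1 else v)
      = (fun (v : Int) river => if river.any (fun t => wallTile board t) then v + 1 else v) := by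
    funext v river
    show (if 0 < river.foldl _ (0 : Int) then v + 1 else v) = _
    rw [if_congr (expansions_pos_iff board river) rfl rfl]
  rw [hfun]
  rw [foldl_count_int (fun r => r.any (fun t => wallTile board t)) rch 0]
  rw [zero_add]

theorem isolatedRiver_spec : Claim_equal_isolatedRiver := by
  intro board _ _
  unfold Spec_isolatedRiver
  have hcells : ∀ c ∈ cellsOf board, 0 ≤ c.1 ∧ c.1 < (board.length : Int) ∧
      0 ≤ c.2 ∧ c.2 < (board.length : Int) := by
    intro c hc
    unfold cellsOf at hc
    rw [List.mem_flatMap] at hc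
    obtain ⟨i, hi, hc⟩ := hc
    rw [List.mem_map] at hc
    obtain ⟨j, hj, rfl⟩ := hc
    rw [PySem.List.mem_pyRange_one] at hi hj
    exact ⟨hi.1, hi.2, hj.1, hj.2⟩
  have hmain := scan_par board (cellsOf board) [] PySem.Set.empty 0 0 [] hcells rfl
    (by intro r hr; exact absurd hr List.not_mem_nil)
    (by intro C hC; exact absurd hC List.not_mem_nil)
    (by intro x; simp [PySem.Set.empty])
    (by simp) (by simp)
  obtain ⟨hmap, hlaw, hrep, hVis, hrc, hwc⟩ := hmain
  rw [isoA_eq, findRivers_eq, alt_eq]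
  show _ = (if ((cellsOf board).foldl (stepBF board) (PySem.Set.empty, (0 : Int), (0 : Int))).2.1
        = 1 then none
      else if ((cellsOf board).foldl (stepBF board) (PySem.Set.empty, (0 : Int), (0 : Int))).2.2
        = ((cellsOf board).foldl (stepBF board) (PySem.Set.empty, (0 : Int), (0 : Int))).2.1
      then some false else some true)
  set rivers := (cellsOf board).foldl (stepAF board) [] with hrivers
  set stB := (cellsOf board).foldl (stepBF board)
      (PySem.Set.empty, (0 : Int), (0 : Int)) with hstB
  set K := compsOf board (cellsOf board) [] with hK
  have hlen : rivers.length = K.length := by rw [← hmap, List.length_map]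
  have hval : validCount board rivers = ((K.filter
      (fun C => decide (∃ u ∈ C, wallTile board u = true))).length : Int) := by
    rw [validCount_eq]
    congr 1
    rw [← hmap, List.filter_map, List.length_map]
    congr 1
    apply List.filter_congr
    intro r _
    show (r.any fun t => wallTile board t) = decide (∃ u ∈ r.toFinset, wallTile board u = true)
    exact any_eq_decide_finset r r.toFinset rfl (fun t => wallTile board t)
  have e1 : (rivers.length = 1) ↔ (stB.2.1 = 1) := by
    rw [hrc, hlen]
    constructor <;> intro h <;> omega
  have e2 : (validCount board rivers = (rivers.length : Int)) ↔ (stB.2.2 = stB.2.1) := by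
    rw [hrc, hwc, hval, hlen]
  exact if_congr e1 rfl (if_congr e2 rfl rfl)
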